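-- pv_equiv track=rewrite | github.com/pmukeshreddy/FastMemoryWriteEnv | tests/_test_llm_client.py | _looks_low_value_or_duplicate
-- ===== SOURCE A (Python) =====
-- def _looks_low_value_or_duplicate(content: str) -> bool:
--     normalized = content.lower()
--     markers = [
--         "duplicate note",
--         "repeated",
--         "opened the dashboard",
--         "thank-you message",
--         "heartbeat check",
--         "without changes",
--         "unrelated",
--     ]
--     return any(marker in normalized for marker in markers)
-- ===== SOURCE B (Python) =====
-- _MARKERS = (
--     "duplicate note",
--     "repeated",
--     "opened the dashboard",
--     "thank-you message",
--     "heartbeat check",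
--     "without changes",
--     "unrelated",
-- )
--
--
-- def _looks_low_value_or_duplicate(content: str) -> bool:
--     # Single left-to-right pass over the positions of the lowered string,
--     # checking at each position whether any marker starts there.
--     s = content.lower()
--     for i in range(len(s) + 1):
--         for m in _MARKERS:
--             if s.startswith(m, i):
--                 return True
--     return False
-- ===== Notes on version B (the rewrite author's own statement) =====
-- stated objective: alternative
-- what changed: Replaces seven independent whole-string substring scans (any(marker in s)) by one pass over the positions of the lowered string, testing at each position whether any marker begins there.
import Mathlib
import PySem

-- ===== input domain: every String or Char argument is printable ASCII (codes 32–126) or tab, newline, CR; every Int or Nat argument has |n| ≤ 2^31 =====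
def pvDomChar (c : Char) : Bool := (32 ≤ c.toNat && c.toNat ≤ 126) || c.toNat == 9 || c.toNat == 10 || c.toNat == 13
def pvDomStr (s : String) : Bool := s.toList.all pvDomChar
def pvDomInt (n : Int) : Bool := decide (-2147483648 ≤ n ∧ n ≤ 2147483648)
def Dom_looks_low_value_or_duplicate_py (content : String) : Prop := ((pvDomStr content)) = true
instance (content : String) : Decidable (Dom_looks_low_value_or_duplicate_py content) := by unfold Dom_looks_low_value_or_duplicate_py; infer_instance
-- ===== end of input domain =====

-- B replaces seven independent whole-string substring scans by one pass over the
-- positions of the lowered string, testing at each position whether any marker begins there (alternative decomposition, same cost).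
-- ===== PORT A =====
def looks_low_value_or_duplicate_py (content : String) : Bool :=
  let normalized := PySem.Str.lower content
  let markers : List String :=
    ["duplicate note", "repeated", "opened the dashboard", "thank-you message",
     "heartbeat check", "without changes", "unrelated"]
  markers.any (fun marker => PySem.Str.isIn marker normalized)

-- ===== PORT B =====
def pvMarkersAlt : List (List Char) :=
  ["duplicate note".toList, "repeated".toList, "opened the dashboard".toList,
   "thank-you message".toList, "heartbeat check".toList, "without changes".toList,
   "unrelated".toList]

-- s.startswith(m, i) for 0 ≤ i ≤ len(s) is exactly: m is a prefix of s[i:] (ported as startswith on drop i)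
def looks_low_value_or_duplicate_py_alt (content : String) : Bool :=
  let s := PySem.Chars.lower content.toList
  (List.range (s.length + 1)).any fun i =>
    pvMarkersAlt.any fun m => PySem.Chars.startswith (s.drop i) m

-- ===== PRECONDITION & SPEC =====
def Spec_looks_low_value_or_duplicate_py (content : String) (out : Bool) : Prop := out = looks_low_value_or_duplicate_py_alt content
instance (content : String) (out : Bool) : Decidable (Spec_looks_low_value_or_duplicate_py content out) := by unfold Spec_looks_low_value_or_duplicate_py; infer_instance

-- ===== CLAIM (what is proved, stated in full; the proofs are below) =====
def Claim_equal_looks_low_value_or_duplicate_py : Prop := ∀ (content : String), Dom_looks_low_value_or_duplicate_py content → Spec_looks_low_value_or_duplicate_py content (looks_low_value_or_duplicate_py content)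

-- ===== LEMMAS AND PROOFS =====

-- substring occurrence ↔ some position i ≤ length where it is a prefix of the suffix
theorem pv_infix_iff_pos (sub s : List Char) :
    sub <:+: s ↔ ∃ i < s.length + 1, sub <+: s.drop i := by
  rw [← PySem.Chars.isIn_iff_infix, ← PySem.Chars.exists_prefix_drop_iff_isIn]
  constructor
  · rintro ⟨j, hj⟩
    by_cases h : j ≤ s.length
    · exact ⟨j, by omega, hj⟩
    · refine ⟨s.length, by omega, ?_⟩
      rw [List.drop_eq_nil_of_le (by omega)] at hj
      rw [List.drop_length]; exact hj
  · rintro ⟨i, _, hi⟩; exact ⟨i, hi⟩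

-- generic: "some marker occurs somewhere" ↔ "at some position some marker is a prefix of the suffix"
theorem pv_any_markers (L : List Char) (ms : List (List Char)) :
    ms.any (fun m => PySem.Chars.isIn m L) =
      (List.range (L.length + 1)).any (fun i => ms.any fun m => PySem.Chars.startswith (L.drop i) m) := by
  rw [Bool.eq_iff_iff]
  simp only [List.any_eq_true, List.mem_range, PySem.Chars.isIn_iff_infix,
    PySem.Chars.startswith_iff]
  constructor
  · rintro ⟨m, hm, hinf⟩
    rcases (pv_infix_iff_pos _ _).1 hinf with ⟨i, hi, hp⟩
    exact ⟨i, hi, m, hm, hp⟩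
  · rintro ⟨i, hi, m, hm, hp⟩
    exact ⟨m, hm, (pv_infix_iff_pos _ _).2 ⟨i, hi, hp⟩⟩

theorem pv_main (content : String) :
    looks_low_value_or_duplicate_py content = looks_low_value_or_duplicate_py_alt content := by
  unfold looks_low_value_or_duplicate_py looks_low_value_or_duplicate_py_alt
  rw [show PySem.Chars.lower content.toList = (PySem.Str.lower content).toList from
    (PySem.Str.toList_lower content).symm]
  rw [← pv_any_markers]
  simp [pvMarkersAlt, PySem.Str.isIn]

-- ===== VERDICT (by name: the statement is the Claim_ definition above) =====
theorem looks_low_value_or_duplicate_py_spec : Claim_equal_looks_low_value_or_duplicate_py := by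
  intro content _
  unfold Spec_looks_low_value_or_duplicate_py
  exact pv_main content
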